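-- pv_equiv track=rewrite | github.com/jpmesperanca/QCS | Code/controlFlowTests.py | createAuxMatrix
-- ===== SOURCE A (Python) =====
-- def createAuxMatrix(R, C, S, M):
--     for i in range(R):
--         temp = []
--         for j in range(C):
--             if i==0:
--                 temp += M[i][j],
--             elif j==0:
--                 temp += M[i][j],
--             else:
--                 temp += 0,
--         S += temp,
--     return S
-- ===== SOURCE B (Python) =====
-- def createAuxMatrix(R, C, S, M):
--     if R <= 0:
--         return S
--     # build the result column by column, then transpose into rows
--     cols = [[M[i][0] for i in range(R)] if j == 0 else [M[0][j]] + [0] * (R - 1)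
--             for j in range(C)]
--     S += [[cols[j][i] for j in range(C)] for i in range(R)]
--     return S
-- ===== Notes on version B (the rewrite author's own statement) =====
-- stated objective: alternative
-- what changed: B builds the result column-wise (first column gathered from M, each later column a head element plus a zero tail) and then transposes the column list into rows, instead of A's row-by-row double loop that branches per cell.
import Mathlib
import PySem

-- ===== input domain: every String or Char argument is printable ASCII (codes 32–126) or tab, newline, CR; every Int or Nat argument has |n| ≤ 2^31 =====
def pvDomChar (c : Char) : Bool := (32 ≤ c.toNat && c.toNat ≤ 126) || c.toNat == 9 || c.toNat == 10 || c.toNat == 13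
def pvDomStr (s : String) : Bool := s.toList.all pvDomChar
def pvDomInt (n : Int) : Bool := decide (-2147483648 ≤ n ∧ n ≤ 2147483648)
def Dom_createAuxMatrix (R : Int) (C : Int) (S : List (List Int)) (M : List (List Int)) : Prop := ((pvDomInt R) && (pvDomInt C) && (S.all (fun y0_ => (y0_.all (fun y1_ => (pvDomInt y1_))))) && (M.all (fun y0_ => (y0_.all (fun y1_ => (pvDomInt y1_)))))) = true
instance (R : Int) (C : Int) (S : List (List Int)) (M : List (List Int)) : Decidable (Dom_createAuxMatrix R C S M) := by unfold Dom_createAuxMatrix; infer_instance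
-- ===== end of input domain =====

-- B builds the result column-wise (first column from M, later columns head+zero-tail) and
-- transposes into rows, instead of A's per-cell branching double loop (objective: alternative).
-- Both A and B mutate S in place (S += …); the equivalence proved here is about the return value.

-- M[i][j], total form (indices are in range on every input admitted by Pre_)
def pvGet2 (M : List (List Int)) (i j : Int) : Int :=
  PySem.List.pyGetD (PySem.List.pyGetD M i []) j 0

-- ===== PORT A =====
def createAuxMatrix (R : Int) (C : Int) (S : List (List Int)) (M : List (List Int)) : List (List Int) :=
  (PySem.List.pyRange 0 R 1).foldl
    (fun acc i =>
      acc ++ [ (PySem.List.pyRange 0 C 1).foldl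
        (fun temp j =>
          temp ++ [ if i = 0 then pvGet2 M i j
                    else if j = 0 then pvGet2 M i j
                    else 0 ]) [] ])
    S

-- ===== PORT B =====
def createAuxMatrix_alt (R : Int) (C : Int) (S : List (List Int)) (M : List (List Int)) : List (List Int) :=
  if R ≤ 0 then S
  else
    let cols := (PySem.List.pyRange 0 C 1).map (fun j =>
      if j = 0 then (PySem.List.pyRange 0 R 1).map (fun i => pvGet2 M i 0)
      else pvGet2 M 0 j :: List.replicate (R - 1).toNat 0)
    S ++ (PySem.List.pyRange 0 R 1).map (fun i =>
      (PySem.List.pyRange 0 C 1).map (fun j =>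
        PySem.List.pyGetD (PySem.List.pyGetD cols j []) i 0))

-- ===== PRECONDITION & SPEC =====
-- Pre_ excludes exactly the inputs where Python A raises IndexError: R>0 and C>0 with M
-- shorter than R, some of its first R rows empty, or its first row shorter than C.
def Pre_createAuxMatrix (R : Int) (C : Int) (S : List (List Int)) (M : List (List Int)) : Prop :=
  R ≤ 0 ∨ C ≤ 0 ∨
    (R ≤ (M.length : Int) ∧ (∀ i ∈ List.range R.toNat, M.getD i [] ≠ []) ∧
      C ≤ ((M.getD 0 []).length : Int))
instance (R : Int) (C : Int) (S : List (List Int)) (M : List (List Int)) : Decidable (Pre_createAuxMatrix R C S M) := by unfold Pre_createAuxMatrix; infer_instance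

def pvWitness_createAuxMatrix : Int × Int × List (List Int) × List (List Int) :=
  (2, 2, [[7]], [[1, 2], [3, 4]])

def Spec_createAuxMatrix (R : Int) (C : Int) (S : List (List Int)) (M : List (List Int)) (out : List (List Int)) : Prop := out = createAuxMatrix_alt R C S M
instance (R : Int) (C : Int) (S : List (List Int)) (M : List (List Int)) (out : List (List Int)) : Decidable (Spec_createAuxMatrix R C S M out) := by unfold Spec_createAuxMatrix; infer_instance

-- ===== CLAIM (what is proved, stated in full; the proofs are below) =====
def Claim_equal_createAuxMatrix : Prop := ∀ (R : Int) (C : Int) (S : List (List Int)) (M : List (List Int)), Dom_createAuxMatrix R C S M → Pre_createAuxMatrix R C S M → Spec_createAuxMatrix R C S M (createAuxMatrix R C S M)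

-- ===== LEMMAS AND PROOFS =====

theorem main (R C : Int) (S M : List (List Int)) :
    createAuxMatrix R C S M = createAuxMatrix_alt R C S M := by
  unfold createAuxMatrix createAuxMatrix_alt
  by_cases hR : R ≤ 0
  · rw [if_pos hR]
    have : PySem.List.pyRange 0 R 1 = [] := by
      simp [PySem.List.pyRange_one]; omega
    simp [this]
  · rw [if_neg hR]
    simp only [PySem.List.foldl_append_singleton_eq_map, List.nil_append]
    congr 1
    apply List.map_congr_left
    intro i hi
    apply List.map_congr_left
    intro j hj
    have hi' : 0 ≤ i ∧ i < R := PySem.List.mem_pyRange_one.mp hi |>.imp (by omega) (by omega)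
    have hj' : 0 ≤ j ∧ j < C := PySem.List.mem_pyRange_one.mp hj |>.imp (by omega) (by omega)
    rw [PySem.List.pyGetD_map_pyRange_of_nonneg _ C j _ hj'.1 hj'.2]
    by_cases hjz : j = 0
    · subst hjz
      simp only [ite_true]
      rw [PySem.List.pyGetD_map_pyRange_of_nonneg _ R i _ hi'.1 hi'.2]
      by_cases hiz : i = 0 <;> simp [hiz]
    · rw [if_neg hjz]
      by_cases hiz : i = 0
      · subst hiz
        simp [PySem.List.pyGetD, hjz]
      · rw [if_neg hiz, if_neg hjz]
        have h1 : (1 : Int) ≤ i := by omega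
        rw [show (pvGet2 M 0 j :: List.replicate (R - 1).toNat 0) =
              [pvGet2 M 0 j] ++ List.replicate (R - 1).toNat 0 from rfl]
        rw [PySem.List.pyGetD_of_nonneg _ _ hi'.1]
        have hlen : i.toNat < 1 + (R - 1).toNat := by omega
        rw [List.getD_eq_getElem?_getD, List.getElem?_append_right (by simp; omega)]
        simp only [List.length_cons, List.length_nil]
        rw [List.getElem?_replicate]
        simp only [if_pos (by omega : i.toNat - 1 < (R - 1).toNat)]
        rfl

-- ===== VERDICT (by name: the statement is the Claim_ definition above) =====
theorem createAuxMatrix_spec : Claim_equal_createAuxMatrix := by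
  intro R C S M _ _
  unfold Spec_createAuxMatrix
  exact main R C S M
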